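-- pv_equiv track=rewrite | github.com/ysuzuki-qc/mt_rebuild | mt_quel_meas/mt_quel_meas/labrad/labrad_job_translate.py | _get_sequence_channel_to_mux_index
-- ===== SOURCE A (Python) =====
-- def _get_sequence_channel_to_mux_index(awg_channel_list: list[str], sequence_to_physical: dict[str, str]) -> dict[str, int]:
--     sequence_to_mux_index: dict[str, int] = {}
--     mux_counter: dict[str, int] = {}
--     for awg_channel in awg_channel_list:
--         mux_counter[awg_channel] = 0
--     for sequence_channel, awg_channel in sequence_to_physical.items():
--         sequence_to_mux_index[sequence_channel] = mux_counter[awg_channel]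
--         mux_counter[awg_channel] += 1
--     return sequence_to_mux_index
-- ===== SOURCE B (Python) =====
-- def _get_sequence_channel_to_mux_index(awg_channel_list: list[str], sequence_to_physical: dict[str, str]) -> dict[str, int]:
--     # Each sequence channel's mux index is the number of earlier sequence channels
--     # routed to the same awg channel (closed form, no running counters).
--     items = list(sequence_to_physical.items())
--     return {
--         sequence_channel: sum(1 for _, a in items[:i] if a == awg_channel)
--         for i, (sequence_channel, awg_channel) in enumerate(items)
--     }
-- ===== Notes on version B (the rewrite author's own statement) =====
-- stated objective: alternative
-- what changed: Replaces A's mutable per-channel running counters (initialised from awg_channel_list) with a per-item closed form: each entry's mux index is the count of earlier entries mapped to the same awg channel; Pre_ excludes the inputs where A raises KeyError because a mapped awg channel is missing from awg_channel_list.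
import Mathlib
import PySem

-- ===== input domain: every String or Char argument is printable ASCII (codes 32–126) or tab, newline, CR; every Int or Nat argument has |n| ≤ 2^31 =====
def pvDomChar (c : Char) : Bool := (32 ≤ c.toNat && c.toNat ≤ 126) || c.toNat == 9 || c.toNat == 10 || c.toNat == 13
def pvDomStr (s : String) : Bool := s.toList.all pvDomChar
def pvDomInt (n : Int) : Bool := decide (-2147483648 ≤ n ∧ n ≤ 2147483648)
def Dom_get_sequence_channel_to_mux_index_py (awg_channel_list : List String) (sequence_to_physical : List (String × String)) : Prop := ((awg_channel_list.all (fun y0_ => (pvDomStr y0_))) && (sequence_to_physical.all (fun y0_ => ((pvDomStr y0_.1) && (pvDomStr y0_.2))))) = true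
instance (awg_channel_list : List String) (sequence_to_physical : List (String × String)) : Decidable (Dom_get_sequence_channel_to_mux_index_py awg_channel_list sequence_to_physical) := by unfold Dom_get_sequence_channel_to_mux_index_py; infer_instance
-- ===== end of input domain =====

-- ===== PORT A =====
-- B replaces A's running per-channel counters with a per-item closed form (count of earlier
-- entries on the same awg channel); alternative decomposition, same output on Pre_.
def get_sequence_channel_to_mux_index_py (awg_channel_list : List String) (sequence_to_physical : List (String × String)) : List (String × Int) :=
  let mux_counter : PySem.Dict String Int :=
    awg_channel_list.foldl (fun d c => PySem.Dict.insert d c 0) PySem.Dict.empty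
  -- 'mux_counter[awg_channel]' raises KeyError when the key is missing: excluded by Pre_;
  -- the port uses getD 0 there (value irrelevant outside Pre_).
  (sequence_to_physical.foldl
      (fun (st : PySem.Dict String Int × PySem.Dict String Int) p =>
        let v := PySem.Dict.getD st.2 p.2 0
        (PySem.Dict.insert st.1 p.1 v, PySem.Dict.insert st.2 p.2 (v + 1)))
      (PySem.Dict.empty, mux_counter)).1.items

-- ===== PORT B =====
-- the dict comprehension 'for i, (sequence_channel, awg_channel) in enumerate(items)'
def pvAltGo (items : List (String × String)) (i : Nat)
    (out : PySem.Dict String Int) : List (String × String) → PySem.Dict String Int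
  | [] => out
  | p :: rest =>
    pvAltGo items (i + 1)
      -- sum(1 for _, a in items[:i] if a == awg_channel)
      (PySem.Dict.insert out p.1 (((items.take i).countP (fun q => q.2 == p.2) : Int)))
      rest

def get_sequence_channel_to_mux_index_py_alt (awg_channel_list : List String) (sequence_to_physical : List (String × String)) : List (String × Int) :=
  (pvAltGo sequence_to_physical 0 PySem.Dict.empty sequence_to_physical).items

-- ===== PRECONDITION & SPEC =====
-- Pre_ excludes exactly the inputs on which A raises KeyError: some mapped awg channel is
-- not in awg_channel_list (A returns no value there).
def Pre_get_sequence_channel_to_mux_index_py (awg_channel_list : List String) (sequence_to_physical : List (String × String)) : Prop :=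
  ∀ p ∈ sequence_to_physical, p.2 ∈ awg_channel_list
instance (awg_channel_list : List String) (sequence_to_physical : List (String × String)) : Decidable (Pre_get_sequence_channel_to_mux_index_py awg_channel_list sequence_to_physical) := by unfold Pre_get_sequence_channel_to_mux_index_py; infer_instance
def pvWitness_get_sequence_channel_to_mux_index_py : List String × (List (String × String)) :=
  (["awg1", "awg2"], [("s0", "awg1"), ("s1", "awg2"), ("s2", "awg1")])

def Spec_get_sequence_channel_to_mux_index_py (awg_channel_list : List String) (sequence_to_physical : List (String × String)) (out : List (String × Int)) : Prop := out = get_sequence_channel_to_mux_index_py_alt awg_channel_list sequence_to_physical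
instance (awg_channel_list : List String) (sequence_to_physical : List (String × String)) (out : List (String × Int)) : Decidable (Spec_get_sequence_channel_to_mux_index_py awg_channel_list sequence_to_physical out) := by unfold Spec_get_sequence_channel_to_mux_index_py; infer_instance

-- ===== CLAIM (what is proved, stated in full; the proofs are below) =====
def Claim_equal_get_sequence_channel_to_mux_index_py : Prop := ∀ (awg_channel_list : List String) (sequence_to_physical : List (String × String)), Dom_get_sequence_channel_to_mux_index_py awg_channel_list sequence_to_physical → Pre_get_sequence_channel_to_mux_index_py awg_channel_list sequence_to_physical → Spec_get_sequence_channel_to_mux_index_py awg_channel_list sequence_to_physical (get_sequence_channel_to_mux_index_py awg_channel_list sequence_to_physical)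

-- ===== LEMMAS AND PROOFS =====

theorem pv_init_get? (awg_channel_list : List String) (d : PySem.Dict String Int) (b : String) :
    (awg_channel_list.foldl (fun d c => PySem.Dict.insert d c 0) d).get? b
      = if b ∈ awg_channel_list then some 0 else d.get? b := by
  induction awg_channel_list generalizing d with
  | nil => simp
  | cons a rest ih =>
    simp only [List.foldl_cons, ih, PySem.Dict.get?_insert, List.mem_cons]
    by_cases hb : b ∈ rest <;> by_cases hba : b = a <;> simp [hb, hba]

theorem pv_main (awg_channel_list : List String) :
    ∀ (l pref : List (String × String)) (out mc : PySem.Dict String Int),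
    (∀ p ∈ l, p.2 ∈ awg_channel_list) →
    (∀ b ∈ awg_channel_list,
        mc.get? b = some ((pref.countP (fun q => q.2 == b) : Nat) : Int)) →
    (l.foldl
        (fun (st : PySem.Dict String Int × PySem.Dict String Int) p =>
          let v := PySem.Dict.getD st.2 p.2 0
          (PySem.Dict.insert st.1 p.1 v, PySem.Dict.insert st.2 p.2 (v + 1)))
        (out, mc)).1
      = pvAltGo (pref ++ l) pref.length out l := by
  intro l
  induction l with
  | nil => intro pref out mc _ _; rfl
  | cons p rest ih =>
    intro pref out mc hl hmc
    have ha : p.2 ∈ awg_channel_list := hl p (by simp)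
    have hget : mc.getD p.2 0 = ((pref.countP (fun q => q.2 == p.2) : Nat) : Int) := by
      rw [PySem.Dict.getD_eq_get?_getD, hmc p.2 ha]; rfl
    simp only [List.foldl_cons, pvAltGo]
    have htake : (pref ++ p :: rest).take pref.length = pref := by
      simp
    rw [htake, ← hget]
    have hassoc : pref ++ p :: rest = (pref ++ [p]) ++ rest := by simp
    have hlen : pref.length + 1 = (pref ++ [p]).length := by simp
    rw [hassoc, hlen]
    apply ih (pref ++ [p])
    · intro q hq; exact hl q (by simp [hq])
    · intro b hb
      rw [PySem.Dict.get?_insert]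
      by_cases hbp : b = p.2
      · subst hbp
        rw [if_pos rfl, hget]
        simp [List.countP_append]
      · rw [if_neg hbp, hmc b hb]
        have : (p.2 == b) = false := by simpa using Ne.symm hbp
        simp [List.countP_append, this]

-- ===== VERDICT (by name: the statement is the Claim_ definition above) =====
theorem get_sequence_channel_to_mux_index_py_spec : Claim_equal_get_sequence_channel_to_mux_index_py := by
  intro awg stp _ hpre
  unfold Spec_get_sequence_channel_to_mux_index_py
  unfold get_sequence_channel_to_mux_index_py get_sequence_channel_to_mux_index_py_alt
  have := pv_main awg stp [] PySem.Dict.empty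
    (awg.foldl (fun d c => PySem.Dict.insert d c 0) PySem.Dict.empty)
    hpre
    (by intro b hb; rw [pv_init_get? awg PySem.Dict.empty b, if_pos hb]; rfl)
  simp only [List.nil_append, List.length_nil] at this
  exact congrArg PySem.Dict.items this
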